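-- pv_equiv track=rewrite | github.com/pmjangid90/trendingTool | backend/OIBasedSentiments.py | confirm_signals
-- ===== SOURCE A (Python) =====
-- def confirm_signals(sentiments, streak):
--     confirmed = []
--     count = 1
--     for i in range(len(sentiments)):
--         if i == 0:
--             confirmed.append('Not enough data')
--             continue
--         if sentiments[i] == sentiments[i-1] and sentiments[i] not in ['Sideways/Chop', 'Not enough data']:
--             count += 1
--         else:
--             count = 1
--         if count >= streak and sentiments[i] not in ['Sideways/Chop', 'Not enough data']:
--             confirmed.append(sentiments[i])
--         else:
--             confirmed.append('Sideways/Chop')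
--     return confirmed
-- ===== SOURCE B (Python) =====
-- def confirm_signals(sentiments, streak):
--     # runs-first: split into maximal runs of equal values, then emit per run offset
--     runs = []
--     n = len(sentiments)
--     i = 0
--     while i < n:
--         v = sentiments[i]
--         j = i + 1
--         while j < n and sentiments[j] == v:
--             j += 1
--         runs.append((v, j - i))
--         i = j
--     out = []
--     g = 0
--     for v, L in runs:
--         ok = v not in ('Sideways/Chop', 'Not enough data')
--         for j in range(L):
--             if g + j == 0:
--                 out.append('Not enough data')
--             elif ok and j + 1 >= streak:
--                 out.append(v)
--             else:
--                 out.append('Sideways/Chop')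
--         g += L
--     return out
-- ===== Notes on version B (the rewrite author's own statement) =====
-- stated objective: alternative
-- what changed: Replaces A's flat index loop with a running streak counter by a runs-first decomposition: split the input into maximal runs of equal values, then emit each element from its run's value and offset (offset+1 replaces the counter), with a global index only to spot position 0.
import Mathlib
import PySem

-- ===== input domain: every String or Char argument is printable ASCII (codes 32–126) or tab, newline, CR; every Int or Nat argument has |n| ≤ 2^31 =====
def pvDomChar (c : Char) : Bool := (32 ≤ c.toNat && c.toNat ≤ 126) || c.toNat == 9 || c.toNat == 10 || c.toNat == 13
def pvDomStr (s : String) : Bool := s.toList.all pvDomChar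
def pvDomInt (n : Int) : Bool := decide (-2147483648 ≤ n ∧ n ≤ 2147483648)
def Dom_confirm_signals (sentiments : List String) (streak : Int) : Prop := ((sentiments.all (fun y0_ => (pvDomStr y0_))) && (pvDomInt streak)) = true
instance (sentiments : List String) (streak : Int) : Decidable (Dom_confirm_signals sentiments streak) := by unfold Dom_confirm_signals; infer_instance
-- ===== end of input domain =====

-- B replaces A's flat index loop with running streak counter by a runs-first
-- decomposition (maximal runs of equal values, emission by run offset); objective: alternative.

-- ===== PORT A =====
-- A's index loop over sentiments, ported as the structural recursion carrying
-- (prev = sentiments[i-1], count); i == 0 emits 'Not enough data' before the loop body.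
def confirmLoopA (streak : Int) : String → Int → List String → List String
  | _, _, [] => []
  | prev, count, cur :: rest =>
    let count' : Int :=
      if cur == prev && !(cur == "Sideways/Chop" || cur == "Not enough data") then count + 1 else 1
    (if decide (count' ≥ streak) && !(cur == "Sideways/Chop" || cur == "Not enough data")
       then cur else "Sideways/Chop") :: confirmLoopA streak cur count' rest

def confirm_signals (sentiments : List String) (streak : Int) : List String :=
  match sentiments with
  | [] => []
  | x :: xs => "Not enough data" :: confirmLoopA streak x 1 xs

-- ===== PORT B =====
-- Source B's run scanner: the inner while advances over the run (takeWhile), rest = rest[k:].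
def runsB : List String → List (String × Nat)
  | [] => []
  | x :: xs =>
    (x, (xs.takeWhile (· == x)).length + 1) :: runsB (xs.dropWhile (· == x))
  termination_by s => s.length
  decreasing_by
    simp only [List.length_cons]
    exact Nat.lt_succ_of_le (xs.length_dropWhile_le _)

-- Source B's emission loops: for each run (v, L), for j in range L, global index g + j.
def emitB (streak : Int) : List (String × Nat) → Nat → List String
  | [], _ => []
  | (v, L) :: rs, g =>
    let ok := !(v == "Sideways/Chop" || v == "Not enough data")
    ((List.range L).map (fun j =>
        if g + j == 0 then "Not enough data"
        else if ok && decide ((j : Int) + 1 ≥ streak) then v else "Sideways/Chop"))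
      ++ emitB streak rs (g + L)

def confirm_signals_alt (sentiments : List String) (streak : Int) : List String :=
  emitB streak (runsB sentiments) 0

-- ===== PRECONDITION & SPEC =====
def Spec_confirm_signals (sentiments : List String) (streak : Int) (out : List String) : Prop := out = confirm_signals_alt sentiments streak
instance (sentiments : List String) (streak : Int) (out : List String) : Decidable (Spec_confirm_signals sentiments streak out) := by unfold Spec_confirm_signals; infer_instance

-- ===== CLAIM =====
def Claim_equal_confirm_signals : Prop := ∀ (sentiments : List String) (streak : Int), Dom_confirm_signals sentiments streak → Spec_confirm_signals sentiments streak (confirm_signals sentiments streak)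

-- ===== LEMMAS AND PROOFS =====

def okB (v : String) : Bool := !(v == "Sideways/Chop" || v == "Not enough data")

-- A's loop at a fresh run start (prev differs from the head): count resets to 1.
def fGo (streak : Int) : List String → List String
  | [] => []
  | r :: t =>
    (if okB r && decide ((1 : Int) ≥ streak) then r else "Sideways/Chop") ::
      confirmLoopA streak r 1 t

theorem freshStart (streak : Int) (prev : String) (c : Int) (r : String) (t : List String)
    (h : (r == prev) = false) :
    confirmLoopA streak prev c (r :: t) = fGo streak (r :: t) := by
  simp only [confirmLoopA, fGo, h, Bool.false_and, Bool.false_eq_true, if_false, okB]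
  rw [Bool.and_comm]
  rfl

theorem runA (streak : Int) (v : String) :
    ∀ (k : Nat) (c : Int) (rest : List String),
      (∀ r t, rest = r :: t → (r == v) = false) →
      confirmLoopA streak v c (List.replicate k v ++ rest) =
        (List.range k).map
          (fun (j : Nat) => if okB v && decide (c + (j : Int) + 1 ≥ streak) then v else "Sideways/Chop")
          ++ fGo streak rest := by
  intro k
  induction k with
  | zero =>
    intro c rest hne
    cases rest with
    | nil => simp [confirmLoopA, fGo]
    | cons r t => simpa using freshStart streak v c r t (hne r t rfl)
  | succ k ih =>
    intro c rest hne
    simp only [List.replicate_succ, List.cons_append, confirmLoopA, beq_self_eq_true,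
      Bool.true_and]
    rw [List.range_succ_eq_map, List.map_cons, List.map_map, List.cons_append]
    by_cases hok : okB v = true
    · have hok' : (!(v == "Sideways/Chop" || v == "Not enough data")) = true := hok
      rw [hok', if_pos (show true = true from rfl), ih (c + 1) rest hne]
      congr 1
      · simp only [hok, Bool.true_and, Bool.and_true, Nat.cast_zero, add_zero]
      · congr 1
        apply List.map_congr_left
        intro j _
        simp only [Function.comp_apply]
        have h2 : c + (j.succ : Int) + 1 = c + 1 + (j : Int) + 1 := by push_cast; ring
        rw [h2]
    · have hok' : (!(v == "Sideways/Chop" || v == "Not enough data")) = false := by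
        simpa [okB] using hok
      have hokf : okB v = false := by simpa [okB] using hok
      rw [hok', if_neg (show ¬ false = true by simp), Bool.and_false,
        if_neg (show ¬ false = true by simp), ih 1 rest hne]
      congr 1
      · simp [hokf]
      · congr 1
        apply List.map_congr_left
        intro j _
        simp [hokf]

theorem takeWhile_rep (x : String) (xs : List String) :
    xs.takeWhile (· == x) = List.replicate (xs.takeWhile (· == x)).length x := by
  rw [List.eq_replicate_iff]
  refine ⟨rfl, ?_⟩
  intro b hb
  have := List.mem_takeWhile_imp hb
  simpa [eq_comm] using eq_of_beq this

theorem dropWhile_head_ne (x : String) (xs : List String) :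
    ∀ r t, xs.dropWhile (· == x) = r :: t → (r == x) = false := by
  intro r t h
  have := List.head?_dropWhile_not (· == x) xs
  rw [h] at this
  simpa using this

theorem split_run (x : String) (xs : List String) :
    xs = List.replicate (xs.takeWhile (· == x)).length x ++ xs.dropWhile (· == x) := by
  conv_lhs => rw [← List.takeWhile_append_dropWhile (p := (· == x)) (l := xs)]
  rw [← takeWhile_rep]

-- emission with g ≥ 1: the g + j == 0 branch never fires, so the map is g-independent.
theorem emit_core (streak : Int) :
    ∀ (s : List String) (g : Nat), 1 ≤ g →
      emitB streak (runsB s) g = fGo streak s := by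
  intro s
  induction s using runsB.induct with
  | case1 => intro g _; simp [runsB, emitB, fGo]
  | case2 x xs ih =>
    intro g hg
    have hsplit := split_run x xs
    have hne := dropWhile_head_ne x xs
    rw [runsB, emitB, fGo]
    conv_rhs => rw [hsplit]
    rw [runA streak x _ 1 _ hne]
    rw [← ih (g + ((xs.takeWhile (· == x)).length + 1)) (by omega)]
    rw [List.range_succ_eq_map, List.map_cons, List.map_map, List.cons_append]
    congr 1
    · have hz : (g + 0 == 0) = false := by simp; omega
      simp only [hz, Bool.false_eq_true, if_false, Nat.cast_zero, zero_add, okB]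
      rfl
    · congr 1
      apply List.map_congr_left
      intro j _
      have h0 : (g + j.succ == 0) = false := by simp
      simp only [Function.comp_apply, h0, Bool.false_eq_true, if_false, okB]
      have h2 : (j.succ : Int) + 1 = 1 + (j : Int) + 1 := by push_cast; ring
      rw [h2]
      rfl

theorem top_eq (sentiments : List String) (streak : Int) :
    confirm_signals sentiments streak = confirm_signals_alt sentiments streak := by
  cases sentiments with
  | nil => simp [confirm_signals, confirm_signals_alt, runsB, emitB]
  | cons x xs =>
    have hsplit := split_run x xs
    have hne := dropWhile_head_ne x xs
    show "Not enough data" :: confirmLoopA streak x 1 xs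
        = emitB streak (runsB (x :: xs)) 0
    rw [runsB, emitB]
    conv_lhs => rw [hsplit]
    rw [runA streak x _ 1 _ hne]
    rw [← emit_core streak _ (0 + ((xs.takeWhile (· == x)).length + 1)) (by omega)]
    rw [List.range_succ_eq_map, List.map_cons, List.map_map, List.cons_append]
    congr 1
    · congr 1
      apply List.map_congr_left
      intro j _
      have h0 : (0 + j.succ == 0) = false := by simp
      simp only [Function.comp_apply, h0, Bool.false_eq_true, if_false, okB]
      have h2 : (j.succ : Int) + 1 = 1 + (j : Int) + 1 := by push_cast; ring
      rw [h2]
      rfl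

-- ===== VERDICT =====
theorem confirm_signals_spec : Claim_equal_confirm_signals := by
  intro sentiments streak _
  exact top_eq sentiments streak
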